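-- pv_equiv track=rewrite | github.com/noweber/Sequence-Alignment-Algorithms | efficient_3.py | CostOfAlignment
-- ===== SOURCE A (Python) =====
-- DELTA = 30
--
-- ALPHA = {
--             "A": { "A": 0, "C": 110, "G": 48, "T": 94 },
--             "C": { "A": 110, "C": 0, "G": 118, "T": 48 },
--             "G": { "A": 48, "C": 118, "G": 0, "T": 110 },
--             "T": { "A": 94, "C": 48, "G": 110, "T": 0 }
--         }
--
-- def CostOfAlignment(Xs, Ys):
--     """ BASIC """
--     M = len(Xs)
--     N = len(Ys)
--
--     # M+1 and N+1 -- range is non-inclusive, row/col 0 will be BASE CASE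
--     OPT = [[0 for j in range(N+1)] for i in range(M+1)]
--
--     # Base Cases
--     for i in range(M+1):
--         OPT[i][0] = i * DELTA
--     for j in range(N+1):
--         OPT[0][j] = j * DELTA
--
--     for i in range(1, M+1):
--         for j in range(1, N+1):
--             OPT[i][j] = min(OPT[i-1][j-1] + ALPHA[Xs[i-1]][Ys[j-1]],
--                             OPT[i-1][j] + DELTA,
--                             OPT[i][j-1] + DELTA)
--
--     return OPT[M][:]
--
--     """ EFFICIENT """
--     """
--     # Bottom-up pass to find similarity between a half of X (Xs) and a substring of Y (Ys)
--     # Fill array from L -> R, column by column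
--     # Memory efficient by only keeping 2 columns until we get similarity between Xs and Ys at OPT(len(Xs), len(Ys))
--     OPT = [[0 for i in range(2)] for j in range(len(Ys))]   # i columns, j rows
--
--     yi = 0
--     # Initial values
--     # Empty Ys
--     for j in range(len(Ys)):
--         OPT[j][0] = j * DELTA
--     # Empty Xs
--     OPT[0][1] = DELTA
--
--     # For all substrings of Xs
--     for xi in range(1, len(Xs)):
--         # Go down column of Ys from 1 and compute opt sol
--         for j in range(len(Ys)):
--             if j == 0:
--                 OPT[j][0] = yi * DELTA
--                 yi = yi + 1
--
--             OPT[j][1] = min(OPT[j-1][0] + ALPHA[X[xi-1]][Y[j-1]],   # Diag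
--                             OPT[j-1][1] + DELTA,                    # Left
--                             OPT[j][0] + DELTA)                      # Down
--
--         # Shift over 1 index of OPT to prep for new values
--         # for j in range(len(Ys)):
--
--     return OPT[1][:]
--     """
-- ===== SOURCE B (Python) =====
-- DELTA = 30
--
-- ALPHA = {
--             "A": { "A": 0, "C": 110, "G": 48, "T": 94 },
--             "C": { "A": 110, "C": 0, "G": 118, "T": 48 },
--             "G": { "A": 48, "C": 118, "G": 0, "T": 110 },
--             "T": { "A": 94, "C": 48, "G": 110, "T": 0 }
--         }
--
-- def CostOfAlignment(Xs, Ys):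
--     """Structural recursion on Xs: the row for Xs is computed from the row for
--     Xs[:-1], each row built functionally by zipping Ys with the previous row
--     and its shift (no matrix, no index arithmetic)."""
--     if not Xs:
--         return [j * DELTA for j in range(len(Ys) + 1)]
--     prev = CostOfAlignment(Xs[:-1], Ys)
--     x = Xs[-1]
--     row = [len(Xs) * DELTA]
--     for y, diag, up in zip(Ys, prev, prev[1:]):
--         row.append(min(diag + ALPHA[x][y], up + DELTA, row[-1] + DELTA))
--     return row
-- ===== Notes on version B (the rewrite author's own statement) =====
-- stated objective: alternative
-- what changed: B replaces A's imperatively filled (M+1)x(N+1) matrix (allocate, two base-case index loops, nested index loops mutating cells) by structural recursion on Xs: the row for Xs is defined from the row for Xs[:-1], and each row is built functionally by zipping Ys with the previous row and its shift, with no matrix and no index arithmetic.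
import Mathlib
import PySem

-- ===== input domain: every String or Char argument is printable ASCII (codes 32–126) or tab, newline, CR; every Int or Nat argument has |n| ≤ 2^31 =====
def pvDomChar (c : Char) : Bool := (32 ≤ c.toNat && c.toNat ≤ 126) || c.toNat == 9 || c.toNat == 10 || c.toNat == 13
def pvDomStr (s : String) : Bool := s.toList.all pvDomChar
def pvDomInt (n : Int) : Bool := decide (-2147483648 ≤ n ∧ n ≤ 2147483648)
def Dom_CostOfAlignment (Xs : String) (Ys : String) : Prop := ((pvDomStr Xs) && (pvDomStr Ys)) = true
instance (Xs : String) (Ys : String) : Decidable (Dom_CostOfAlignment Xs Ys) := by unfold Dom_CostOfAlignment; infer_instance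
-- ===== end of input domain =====

-- B replaces A's imperatively filled matrix by structural recursion on Xs, each row built
-- functionally by zipping Ys with the previous row and its shift (alternative decomposition).

-- ===== PORT A =====
def pvDELTA : Int := 30

-- ALPHA[x][y]; hand-ported lookup table, exact for keys in {'A','C','G','T'} (all lookups lie there under Pre_;
-- on other keys Python raises KeyError, which Pre_ excludes).
def pvALPHA (x y : Char) : Int :=
  match x, y with
  | 'A','A' => 0   | 'A','C' => 110 | 'A','G' => 48  | 'A','T' => 94
  | 'C','A' => 110 | 'C','C' => 0   | 'C','G' => 118 | 'C','T' => 48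
  | 'G','A' => 48  | 'G','C' => 118 | 'G','G' => 0   | 'G','T' => 110
  | 'T','A' => 94  | 'T','C' => 48  | 'T','G' => 110 | 'T','T' => 0
  | _, _ => 0

-- Literal port of A: build the (M+1)x(N+1) matrix, base-case loops, nested fill loops, return OPT[M][:]
-- (the final `[:]` copy is value-identical to row M).  Python's min(a,b,c) = min (min a b) c on ints.
def CostOfAlignment (Xs : String) (Ys : String) : List Int :=
  let X := Xs.toList
  let Y := Ys.toList
  let M := X.length
  let N := Y.length
  let OPT : List (List Int) := List.replicate (M+1) (List.replicate (N+1) 0)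
  let OPT := (List.range (M+1)).foldl
      (fun O i => O.set i ((O.getD i []).set 0 ((i : Int) * pvDELTA))) OPT
  let OPT := (List.range (N+1)).foldl
      (fun O j => O.set 0 ((O.getD 0 []).set j ((j : Int) * pvDELTA))) OPT
  let OPT := (List.range' 1 M).foldl (fun O i =>
      (List.range' 1 N).foldl (fun O j =>
        O.set i ((O.getD i []).set j
          (min (min ((O.getD (i-1) []).getD (j-1) 0 + pvALPHA (X.getD (i-1) ' ') (Y.getD (j-1) ' '))
                    ((O.getD (i-1) []).getD j 0 + pvDELTA))
               ((O.getD i []).getD (j-1) 0 + pvDELTA)))) O) OPT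
  OPT.getD M []

-- ===== PORT B =====
-- Literal port of B (Source B): structural recursion on X peeling the last character
-- (`Xs[:-1]` = dropLast, `Xs[-1]` = getLast, `row[-1]` = getLastD on the always-nonempty row);
-- the row is built by the fold over `zip(Ys, prev, prev[1:])`.
def pvAltGo (X : List Char) (Y : List Char) : List Int :=
  if hX : X = [] then
    (List.range (Y.length + 1)).map (fun j : Nat => (j : Int) * pvDELTA)
  else
    let prev := pvAltGo X.dropLast Y
    let x := X.getLast hX
    (Y.zip (prev.zip prev.tail)).foldl
      (fun row p =>
        row ++ [min (min (p.2.1 + pvALPHA x p.1) (p.2.2 + pvDELTA)) (row.getLastD 0 + pvDELTA)])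
      [(X.length : Int) * pvDELTA]
termination_by X.length
decreasing_by
  have : X.length ≠ 0 := fun h => hX (List.length_eq_zero_iff.mp h)
  simp [List.length_dropLast]; omega

def CostOfAlignment_alt (Xs : String) (Ys : String) : List Int :=
  pvAltGo Xs.toList Ys.toList

-- ===== PRECONDITION & SPEC =====
-- Pre_ excludes exactly the inputs where A raises KeyError: both strings nonempty and some character
-- outside {'A','C','G','T'} (with either string empty the fill loops never run and no lookup happens).
def pvValidBases (s : String) : Bool :=
  s.toList.all (fun c => c = 'A' || c = 'C' || c = 'G' || c = 'T')

def Pre_CostOfAlignment (Xs : String) (Ys : String) : Prop :=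
  Xs.toList = [] ∨ Ys.toList = [] ∨ (pvValidBases Xs = true ∧ pvValidBases Ys = true)
instance (Xs : String) (Ys : String) : Decidable (Pre_CostOfAlignment Xs Ys) := by
  unfold Pre_CostOfAlignment; infer_instance

def pvWitness_CostOfAlignment : String × String := ("ACGT", "AG")

def Spec_CostOfAlignment (Xs : String) (Ys : String) (out : List Int) : Prop := out = CostOfAlignment_alt Xs Ys
instance (Xs : String) (Ys : String) (out : List Int) : Decidable (Spec_CostOfAlignment Xs Ys out) := by unfold Spec_CostOfAlignment; infer_instance

-- ===== CLAIM (what is proved, stated in full; the proofs are below) =====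
def Claim_equal_CostOfAlignment : Prop := ∀ (Xs : String) (Ys : String), Dom_CostOfAlignment Xs Ys → Pre_CostOfAlignment Xs Ys → Spec_CostOfAlignment Xs Ys (CostOfAlignment Xs Ys)

-- ===== LEMMAS AND PROOFS =====

-- The reference recurrence both ports are reduced to: pvOpt X Y i j = OPT[i][j].
def pvOpt (X Y : List Char) : Nat → Nat → Int
  | 0, j => (j : Int) * pvDELTA
  | i+1, 0 => ((i : Int) + 1) * pvDELTA
  | i+1, j+1 =>
      min (min (pvOpt X Y i j + pvALPHA (X.getD i ' ') (Y.getD j ' '))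
               (pvOpt X Y i (j+1) + pvDELTA))
          (pvOpt X Y (i+1) j + pvDELTA)
termination_by i j => (i, j)

lemma pv_getD_set {α : Type} (d : α) (l : List α) (i r : Nat) (x : α) :
    (l.set i x).getD r d = if i = r ∧ i < l.length then x else l.getD r d := by
  rw [List.getD_eq_getElem?_getD, List.getD_eq_getElem?_getD, List.getElem?_set]
  split_ifs with h1 h2 h3
  all_goals simp_all
  all_goals omega

lemma pv_eq_of_getD {α : Type} (d : α) (l1 l2 : List α) (hl : l1.length = l2.length)
    (h : ∀ j, j < l1.length → l1.getD j d = l2.getD j d) : l1 = l2 := by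
  apply List.ext_getElem hl
  intro i h1 h2
  have := h i h1
  rwa [List.getD_eq_getElem l1 d h1, List.getD_eq_getElem l2 d h2] at this

/-- A fold that sets index `i` at step `i`, over `range' a k`: length and pointwise result. -/
lemma pv_foldl_set_getD {α : Type} (d : α) (g : Nat → α → α) :
    ∀ (k a : Nat) (L : List α),
      (((List.range' a k).foldl (fun O i => O.set i (g i (O.getD i d))) L).length = L.length) ∧
      ∀ r, ((List.range' a k).foldl (fun O i => O.set i (g i (O.getD i d))) L).getD r d
          = if a ≤ r ∧ r < a + k ∧ r < L.length then g r (L.getD r d) else L.getD r d := by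
  intro k
  induction k with
  | zero => intro a L; constructor
            · simp
            · intro r; simp [List.range']; omega
  | succ k ih =>
    intro a L
    rw [List.range'_succ]
    simp only [List.foldl_cons]
    obtain ⟨ihlen, ihget⟩ := ih (a+1) (L.set a (g a (L.getD a d)))
    constructor
    · rw [ihlen]; simp
    · intro r
      rw [ihget r, pv_getD_set]
      simp only [List.length_set]
      by_cases hra : a = r
      · subst hra
        split_ifs <;> first | rfl | omega
      · simp only [hra, false_and, if_false]
        split_ifs <;> first | rfl | omega

/-- A fold whose body only touches index 0 collapses to one `set`. -/
lemma pv_foldl_set_zero {α : Type} (d : α) (h : Nat → α → α) :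
    ∀ (js : List Nat) (O : List α), 0 < O.length →
      js.foldl (fun O j => O.set 0 (h j (O.getD 0 d))) O
        = O.set 0 (js.foldl (fun r j => h j r) (O.getD 0 d)) := by
  intro js
  induction js with
  | nil =>
    intro O hO
    simp only [List.foldl_nil]
    apply pv_eq_of_getD d _ _ (by simp)
    intro j hj
    rw [pv_getD_set]
    split_ifs with h
    · rw [← h.1]
    · rfl
  | cons j js ih =>
    intro O hO
    simp only [List.foldl_cons]
    rw [ih _ (by simpa using hO)]
    rw [List.set_set, pv_getD_set]
    simp [hO]

/-- A's inner loop only rewrites row `i` (and reads rows `i-1`, `i`): it collapses to a fold on row `i`. -/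
lemma pv_innerA_row (c : Nat → Int) (i : Nat) (hi1 : 1 ≤ i) :
    ∀ (js : List Nat) (O : List (List Int)), i < O.length →
      js.foldl (fun O j =>
          O.set i ((O.getD i []).set j
            (min (min ((O.getD (i-1) []).getD (j-1) 0 + c j)
                      ((O.getD (i-1) []).getD j 0 + pvDELTA))
                 ((O.getD i []).getD (j-1) 0 + pvDELTA)))) O
      = O.set i (js.foldl (fun r j =>
          r.set j
            (min (min ((O.getD (i-1) []).getD (j-1) 0 + c j)
                      ((O.getD (i-1) []).getD j 0 + pvDELTA))
                 (r.getD (j-1) 0 + pvDELTA))) (O.getD i [])) := by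
  intro js
  induction js with
  | nil =>
    intro O hO
    simp only [List.foldl_nil]
    apply pv_eq_of_getD ([] : List Int) _ _ (by simp)
    intro r hr
    rw [pv_getD_set]
    split_ifs with h
    · rw [← h.1]
    · rfl
  | cons j js ih =>
    intro O hO
    simp only [List.foldl_cons]
    rw [ih _ (by simpa using hO)]
    rw [List.set_set]
    have h1 : (O.set i ((O.getD i []).set j
        (min (min ((O.getD (i-1) []).getD (j-1) 0 + c j)
                  ((O.getD (i-1) []).getD j 0 + pvDELTA))
             ((O.getD i []).getD (j-1) 0 + pvDELTA)))).getD (i-1) [] = O.getD (i-1) [] := by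
      rw [pv_getD_set]
      have hne : ¬ (i = i - 1 ∧ i < O.length) := by omega
      simp [hne]
    have h2 : (O.set i ((O.getD i []).set j
        (min (min ((O.getD (i-1) []).getD (j-1) 0 + c j)
                  ((O.getD (i-1) []).getD j 0 + pvDELTA))
             ((O.getD i []).getD (j-1) 0 + pvDELTA)))).getD i [] =
        (O.getD i []).set j
          (min (min ((O.getD (i-1) []).getD (j-1) 0 + c j)
                    ((O.getD (i-1) []).getD j 0 + pvDELTA))
               ((O.getD i []).getD (j-1) 0 + pvDELTA)) := by
      rw [pv_getD_set]; simp [hO]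
    rw [h1, h2]

/-- A's row fold computes row `i` of the recurrence, given row `i-1` pointwise. -/
lemma pv_rowA (X Y : List Char) (i : Nat) (hi : 1 ≤ i) (old : List Int)
    (hold : ∀ q, q ≤ Y.length → old.getD q 0 = pvOpt X Y (i-1) q) :
    ∀ (k cut : Nat) (r : List Int), 1 ≤ cut → cut + k = Y.length + 1 →
      r.length = Y.length + 1 →
      (∀ q, q < cut → r.getD q 0 = pvOpt X Y i q) →
      (List.range' cut k).foldl (fun r j =>
        r.set j (min (min (old.getD (j-1) 0 + pvALPHA (X.getD (i-1) ' ') (Y.getD (j-1) ' '))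
                          (old.getD j 0 + pvDELTA))
                     (r.getD (j-1) 0 + pvDELTA))) r
      = (List.range (Y.length+1)).map (pvOpt X Y i) := by
  intro k
  induction k with
  | zero =>
    intro cut r hcut hk hlen hr
    simp only [List.range', List.foldl_nil]
    apply pv_eq_of_getD (0 : Int) _ _ (by simp [hlen])
    intro q hq
    rw [hlen] at hq
    rw [hr q (by omega), PySem.List.getD_map_range _ _ _ _ hq]
  | succ k ih =>
    intro cut r hcut hk hlen hr
    rw [List.range'_succ]
    simp only [List.foldl_cons]
    obtain ⟨i', rfl⟩ : ∃ i', i = i' + 1 := ⟨i - 1, by omega⟩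
    obtain ⟨c, rfl⟩ : ∃ c, cut = c + 1 := ⟨cut - 1, by omega⟩
    have hv : min (min (old.getD c 0 + pvALPHA (X.getD i' ' ') (Y.getD c ' '))
                  (old.getD (c+1) 0 + pvDELTA)) (r.getD c 0 + pvDELTA)
        = pvOpt X Y (i'+1) (c+1) := by
      rw [hold c (by omega), hold (c+1) (by omega), hr c (by omega)]
      simp [pvOpt]
    simp only [Nat.add_sub_cancel] at hv ⊢
    rw [hv]
    apply ih (c+2) _ (by omega) (by omega) (by simp [hlen])
    intro q hq
    rw [pv_getD_set]
    by_cases hqc : c + 1 = q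
    · subst hqc; simp [hlen]; omega
    · have : ¬ (c + 1 = q ∧ c + 1 < r.length) := by tauto
      simp only [this, if_false]
      exact hr q (by omega)

/-- Outer loop of A: the final matrix's row `M` is row `M` of the recurrence. -/
lemma pv_outerA (X Y : List Char) :
    ∀ (k i0 : Nat) (O : List (List Int)), 1 ≤ i0 → i0 + k = X.length + 1 →
      O.length = X.length + 1 →
      (∀ r, r < i0 → O.getD r [] = (List.range (Y.length+1)).map (pvOpt X Y r)) →
      (∀ r, i0 ≤ r → r ≤ X.length → O.getD r [] = ((r : Int) * pvDELTA) :: List.replicate Y.length 0) →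
      ((List.range' i0 k).foldl (fun O i =>
        (List.range' 1 Y.length).foldl (fun O j =>
          O.set i ((O.getD i []).set j
            (min (min ((O.getD (i-1) []).getD (j-1) 0 + pvALPHA (X.getD (i-1) ' ') (Y.getD (j-1) ' '))
                      ((O.getD (i-1) []).getD j 0 + pvDELTA))
                 ((O.getD i []).getD (j-1) 0 + pvDELTA)))) O) O).getD X.length []
      = (List.range (Y.length+1)).map (pvOpt X Y X.length) := by
  intro k
  induction k with
  | zero =>
    intro i0 O hi0 hk hOlen hdone hbase
    simp only [List.range', List.foldl_nil]
    exact hdone X.length (by omega)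
  | succ k ih =>
    intro i0 O hi0 hk hOlen hdone hbase
    rw [List.range'_succ]
    simp only [List.foldl_cons]
    have hi0lt : i0 < O.length := by omega
    rw [pv_innerA_row (fun j => pvALPHA (X.getD (i0-1) ' ') (Y.getD (j-1) ' ')) i0 hi0
      (List.range' 1 Y.length) O hi0lt]
    have hold : ∀ q, q ≤ Y.length → (O.getD (i0-1) []).getD q 0 = pvOpt X Y (i0-1) q := by
      intro q hq
      rw [hdone (i0-1) (by omega), PySem.List.getD_map_range _ _ _ _ (by omega)]
    have hstart : O.getD i0 [] = ((i0 : Int) * pvDELTA) :: List.replicate Y.length 0 :=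
      hbase i0 le_rfl (by omega)
    have hrow := pv_rowA X Y i0 hi0 (O.getD (i0-1) []) hold Y.length 1 (O.getD i0 [])
      le_rfl (by omega) (by rw [hstart]; simp)
      (by
        intro q hq
        interval_cases q
        rw [hstart]
        obtain ⟨i', rfl⟩ : ∃ i', i0 = i' + 1 := ⟨i0 - 1, by omega⟩
        simp [pvOpt])
    rw [hrow]
    apply ih (i0+1) _ (by omega) (by omega) (by simp [hOlen])
    · intro r hr
      rw [pv_getD_set]
      by_cases hri : i0 = r
      · subst hri; simp [hi0lt]
      · simp only [hri, false_and, if_false]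
        exact hdone r (by omega)
    · intro r hr1 hr2
      rw [pv_getD_set]
      have : ¬ (i0 = r ∧ i0 < O.length) := by omega
      simp only [this, if_false]
      exact hbase r (by omega) hr2

/-- A computes row `M` of the recurrence. -/
lemma pv_A_main (Xs Ys : String) :
    CostOfAlignment Xs Ys
      = (List.range (Ys.toList.length+1)).map (pvOpt Xs.toList Ys.toList Xs.toList.length) := by
  simp only [CostOfAlignment]
  set X := Xs.toList
  set Y := Ys.toList
  set M := X.length with hM
  set N := Y.length with hN
  obtain ⟨hlen1, hget1⟩ := pv_foldl_set_getD ([] : List Int)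
      (fun i row => row.set 0 ((i : Int) * pvDELTA)) (M+1) 0
      (List.replicate (M+1) (List.replicate (N+1) 0))
  rw [← List.range_eq_range'] at hlen1 hget1
  set B0 := (List.range (M+1)).foldl
      (fun O i => O.set i ((O.getD i []).set 0 ((i : Int) * pvDELTA)))
      (List.replicate (M+1) (List.replicate (N+1) 0)) with hB0def
  have hB0len : B0.length = M+1 := by simpa using hlen1
  have hB0r : ∀ r, r < M+1 → B0.getD r [] = ((r : Int) * pvDELTA) :: List.replicate N 0 := by
    intro r hr
    rw [hget1 r, if_pos (by simp [hr]), List.getD_replicate _ hr, List.replicate_succ]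
    rfl
  rw [pv_foldl_set_zero ([] : List Int) (fun j row => row.set j ((j : Int) * pvDELTA))
      (List.range (N+1)) B0 (by omega)]
  obtain ⟨hlen2, hget2⟩ := pv_foldl_set_getD (0 : Int)
      (fun j _ => (j : Int) * pvDELTA) (N+1) 0 (B0.getD 0 [])
  rw [← List.range_eq_range'] at hlen2 hget2
  set row1 := (List.range (N+1)).foldl (fun r j => r.set j ((j : Int) * pvDELTA)) (B0.getD 0 [])
    with hrow1def
  have hrow0len : (B0.getD 0 []).length = N+1 := by rw [hB0r 0 (by omega)]; simp
  have hrow1len : row1.length = N+1 := by rw [hrow1def, hlen2, hrow0len]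
  have hrow1 : row1 = (List.range (N+1)).map (pvOpt X Y 0) := by
    apply pv_eq_of_getD (0 : Int) _ _ (by simp [hrow1len])
    intro j hj
    rw [hrow1len] at hj
    rw [hrow1def, hget2 j, if_pos ⟨Nat.zero_le _, by omega, by rw [hrow0len]; omega⟩]
    rw [PySem.List.getD_map_range _ _ _ _ hj]
    simp [pvOpt]
  apply pv_outerA X Y M 1 (B0.set 0 row1) le_rfl (by omega)
      (by rw [List.length_set, hB0len])
  · intro r hr
    interval_cases r
    rw [pv_getD_set, if_pos ⟨rfl, by omega⟩]
    exact hrow1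
  · intro r hr1 hr2
    rw [pv_getD_set]
    have : ¬ ((0:Nat) = r ∧ 0 < B0.length) := by omega
    simp only [this, if_false]
    exact hB0r r (by omega)

-- ---- B side ----

lemma pv_dropLast_getD (X : List Char) (q : Nat) (h : q < X.length - 1) :
    X.dropLast.getD q ' ' = X.getD q ' ' := by
  rw [List.getD_eq_getElem?_getD, List.getD_eq_getElem?_getD, List.getElem?_dropLast, if_pos h]

/-- pvOpt only reads X below index i, so dropping the last character does not change it. -/
lemma pv_opt_dropLast (X Y : List Char) :
    ∀ i, i ≤ X.length - 1 → ∀ j, pvOpt X.dropLast Y i j = pvOpt X Y i j := by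
  intro i
  induction i with
  | zero => intro _ j; simp [pvOpt]
  | succ i ihi =>
    intro hi j
    induction j with
    | zero => simp [pvOpt]
    | succ j ihj =>
      simp only [pvOpt]
      rw [ihi (by omega) j, ihi (by omega) (j+1), ihj, pv_dropLast_getD X i (by omega)]

/-- The zipped triples list, expressed over indices `1..N`. -/
lemma pv_zip_form (Y : List Char) (g : Nat → Int) :
    Y.zip ((((List.range (Y.length+1)).map g).zip ((List.range (Y.length+1)).map g).tail))
      = (List.range' 1 Y.length).map (fun j => (Y.getD (j-1) ' ', (g (j-1), g j))) := by
  apply List.ext_getElem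
  · simp
  · intro k h1 h2
    simp only [List.length_zip, List.length_map, List.length_range, List.length_tail,
      List.length_range'] at h1 h2 ⊢
    have hk : k < Y.length := by omega
    rw [List.getElem_zip, List.getElem_zip, List.getElem_tail, List.getElem_map, List.getElem_map,
      List.getElem_map, List.getElem_range, List.getElem_range, List.getElem_range']
    have h3 : 1 + 1 * k - 1 = k := by omega
    have h4 : 1 + 1 * k = k + 1 := by omega
    rw [h3, h4, List.getD_eq_getElem Y ' ' hk]

/-- B's row fold builds row `M` of the recurrence left to right. -/
lemma pv_foldB (X Y : List Char) (m : Nat) (_hm : X.length = m + 1) :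
    ∀ (k cut : Nat), 1 ≤ cut → cut + k = Y.length + 1 →
      (List.range' cut k).foldl (fun row j =>
          row ++ [min (min (pvOpt X Y m (j-1) + pvALPHA (X.getD m ' ') (Y.getD (j-1) ' '))
                           (pvOpt X Y m j + pvDELTA))
                  (row.getLastD 0 + pvDELTA)])
        ((List.range cut).map (pvOpt X Y (m+1)))
      = (List.range (cut+k)).map (pvOpt X Y (m+1)) := by
  intro k
  induction k with
  | zero => intro cut _ _; simp
  | succ k ih =>
    intro cut hcut hk
    rw [List.range'_succ]
    simp only [List.foldl_cons]
    obtain ⟨c, rfl⟩ : ∃ c, cut = c + 1 := ⟨cut - 1, by omega⟩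
    have hlast : (((List.range (c+1)).map (pvOpt X Y (m+1))).getLastD 0) = pvOpt X Y (m+1) c := by
      rw [List.range_succ, List.map_append]
      simp
    rw [hlast]
    have hv : min (min (pvOpt X Y m c + pvALPHA (X.getD m ' ') (Y.getD c ' '))
                  (pvOpt X Y m (c+1) + pvDELTA)) (pvOpt X Y (m+1) c + pvDELTA)
        = pvOpt X Y (m+1) (c+1) := by simp [pvOpt]
    simp only [Nat.add_sub_cancel]
    rw [hv]
    have happ : (List.range (c+1)).map (pvOpt X Y (m+1)) ++ [pvOpt X Y (m+1) (c+1)]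
        = (List.range (c+2)).map (pvOpt X Y (m+1)) := by
      rw [List.range_succ (n := c+1), List.map_append]
      rfl
    have hidx : c + 1 + (k + 1) = c + 2 + k := by omega
    rw [hidx, happ, ih (c+2) (by omega) (by omega)]

/-- B computes row `M` of the recurrence. -/
lemma pv_B_go (X Y : List Char) :
    pvAltGo X Y = (List.range (Y.length+1)).map (pvOpt X Y X.length) := by
  induction X using pvAltGo.induct Y with
  | case1 =>
    rw [pvAltGo]
    rw [dif_pos rfl]
    exact List.map_congr_left (fun j _ => by simp [pvOpt])
  | case2 X hX ih =>
    rw [pvAltGo]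
    rw [dif_neg hX]
    show (Y.zip ((pvAltGo X.dropLast Y).zip (pvAltGo X.dropLast Y).tail)).foldl
        (fun row p =>
          row ++ [min (min (p.2.1 + pvALPHA (X.getLast hX) p.1) (p.2.2 + pvDELTA)) (row.getLastD 0 + pvDELTA)])
        [(X.length : Int) * pvDELTA]
      = (List.range (Y.length+1)).map (pvOpt X Y X.length)
    obtain ⟨m, hm⟩ : ∃ m, X.length = m + 1 := by
      cases h : X.length with
      | zero => exact absurd (List.length_eq_zero_iff.mp h) hX
      | succ n => exact ⟨n, rfl⟩
    have hdrop : X.dropLast.length = m := by rw [List.length_dropLast, hm]; omega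
    have hprev : pvAltGo X.dropLast Y = (List.range (Y.length+1)).map (pvOpt X Y m) := by
      rw [ih, hdrop]
      exact List.map_congr_left (fun j _ => pv_opt_dropLast X Y m (by omega) j)
    have hx : X.getLast hX = X.getD m ' ' := by
      rw [List.getLast_eq_getElem, List.getD_eq_getElem X ' ' (by omega)]
      congr 1
      omega
    rw [hprev, hx, pv_zip_form Y (pvOpt X Y m), List.foldl_map]
    have hinit : [((X.length : Int)) * pvDELTA] = (List.range 1).map (pvOpt X Y (m+1)) := by
      simp [pvOpt, hm]
    rw [hinit]
    have := pv_foldB X Y m hm Y.length 1 le_rfl (by omega)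
    rw [this, hm]
    have hidx : 1 + Y.length = Y.length + 1 := by omega
    rw [hidx]

theorem pv_main (Xs Ys : String) : CostOfAlignment Xs Ys = CostOfAlignment_alt Xs Ys := by
  rw [pv_A_main, CostOfAlignment_alt, pv_B_go]

-- ===== VERDICT (by name: the statement is the Claim_ definition above) =====
theorem CostOfAlignment_spec : Claim_equal_CostOfAlignment := by
  intro Xs Ys _ _
  unfold Spec_CostOfAlignment
  exact pv_main Xs Ys
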